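-- pv_equiv track=rewrite | github.com/Suryaratnam27/leetcode-python-solutions | 492.py | rect
-- ===== SOURCE A (Python) =====
-- area=6
--
-- def rect(area):
--     c=[]
--
--     for b in range(1,area+1):
--         for l in range(b+1,area+1):
--             d=l*b
--             if d==area:
--                 c.append([l,b])
--     min_idx=0
--     s= c[0][0]-c[0][1]
--     for i in range(len(c)):
--         lst=c[i]
--         if s>(lst[0]-lst[1]):
--             min_idx = i
--             s = lst[0] -lst[1]
--     return c[min_idx]
-- ===== SOURCE B (Python) =====
-- def rect(area):
--     # Scan b = 1, 2, ... while b*b < area, remembering the last divisor of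
--     # area seen; that b is the largest width with b < l, so l - b is minimal.
--     best = 1
--     b = 1
--     while b * b < area:
--         if area % b == 0:
--             best = b
--         b += 1
--     return [area // best, best]
-- ===== Notes on version B (the rewrite author's own statement) =====
-- stated objective: faster
-- what changed: B replaces A's O(area^2) enumeration of all factor pairs plus a minimum scan with a single loop over b while b*b < area that keeps the last divisor of area, which is exactly the pair with minimal l-b.
-- outside the precondition, e.g. on rect(1): A raises IndexError, B returns [1, 1]
import Mathlib
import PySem

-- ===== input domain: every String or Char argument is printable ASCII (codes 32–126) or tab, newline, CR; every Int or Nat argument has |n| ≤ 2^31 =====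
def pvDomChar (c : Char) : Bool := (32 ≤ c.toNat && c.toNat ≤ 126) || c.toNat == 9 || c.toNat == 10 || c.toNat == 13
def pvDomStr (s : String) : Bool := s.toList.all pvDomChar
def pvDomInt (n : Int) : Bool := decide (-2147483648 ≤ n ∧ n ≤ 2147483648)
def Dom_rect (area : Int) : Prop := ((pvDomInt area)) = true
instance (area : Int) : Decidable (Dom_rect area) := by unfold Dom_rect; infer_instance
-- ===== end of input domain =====

-- B replaces A's O(area^2) double loop over all factor pairs (plus a minimum
-- scan) by a single scan of b while b*b < area keeping the last divisor found.

-- ===== PORT A =====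
-- the nested loops building c (pairs (l, b) encode Python's 2-element lists [l, b])
def rectC (area : Int) : List (Int × Int) :=
  (PySem.List.pyRange 1 (area + 1) 1).foldl (fun c b =>
    (PySem.List.pyRange (b + 1) (area + 1) 1).foldl (fun c l =>
      let d := l * b
      if d == area then c ++ [(l, b)] else c) c) []

-- the 'for i in range(len(c))' minimum scan
def rectScan (c : List (Int × Int)) (init : Int × Int) : Int × Int :=
  (PySem.List.pyRange 0 (c.length : Int) 1).foldl (fun st i =>
    let lst := PySem.List.pyGetD c i (0, 0)   -- i is always in range here
    if st.2 > lst.1 - lst.2 then (i, lst.1 - lst.2) else st) init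

def rect (area : Int) : List Int :=
  let c := rectC area
  match c with
  | [] => []          -- Python raises IndexError (c[0] on empty c); excluded by Pre_rect
  | c0 :: _ =>
    let r := rectScan c (0, c0.1 - c0.2)
    let best := PySem.List.pyGetD c r.1 (0, 0)
    [best.1, best.2]

-- ===== PORT B =====
-- the 'while b * b < area' loop of Source B, remembering the last divisor
def rectAltLoop (area b best : Int) : Int :=
  if b * b < area then
    rectAltLoop area (b + 1) (if PySem.Int.mod area b == 0 then b else best)
  else best
termination_by (area - b).toNat
decreasing_by
  rename_i h
  have hb : b < area := by nlinarith [sq_nonneg b, sq_nonneg (b - 1)]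
  omega

def rect_alt (area : Int) : List Int :=
  let best := rectAltLoop area 1 1
  [PySem.Int.floordiv area best, best]

-- ===== PRECONDITION & SPEC =====
-- Pre_ excludes area ≤ 1, on which A's candidate list is empty and c[0] raises IndexError.
def Pre_rect (area : Int) : Prop := 2 ≤ area
instance (area : Int) : Decidable (Pre_rect area) := by unfold Pre_rect; infer_instance
def pvWitness_rect : Int := (6)

def Spec_rect (area : Int) (out : List Int) : Prop := out = rect_alt area
instance (area : Int) (out : List Int) : Decidable (Spec_rect area out) := by unfold Spec_rect; infer_instance

-- ===== CLAIM (what is proved, stated in full; the proofs are below) =====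
def Claim_equal_rect : Prop := ∀ (area : Int), Dom_rect area → Pre_rect area → Spec_rect area (rect area)

-- ===== LEMMAS AND PROOFS =====

-- the divisors b of area with b*b < area, in increasing order
def pvDivs (area : Int) : List Int :=
  (PySem.List.pyRange 1 (area + 1) 1).filter (fun b => decide (b ∣ area) && decide (b * b < area))

lemma pv_filter_eq_singleton (q : Int) (p : Int → Bool) (hp : ∀ l, p l = true ↔ l = q) :
    ∀ (a bnd : Int), (PySem.List.pyRange a bnd 1).filter p
      = if a ≤ q ∧ q < bnd then [q] else [] := by
  have H : ∀ n : Nat, ∀ a bnd : Int, (bnd - a).toNat = n →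
      (PySem.List.pyRange a bnd 1).filter p = if a ≤ q ∧ q < bnd then [q] else [] := by
    intro n
    induction n with
    | zero =>
      intro a bnd hn
      rw [PySem.List.pyRange_one_eq_nil (by omega)]
      rw [if_neg (by omega)]
      rfl
    | succ n ih =>
      intro a bnd hn
      rw [PySem.List.pyRange_one_cons (by omega), List.filter_cons]
      cases hpa : p a with
      | false =>
        have hne : a ≠ q := fun h => by simp [h, (hp q).2 rfl] at hpa
        simp only [Bool.false_eq_true, if_false]
        rw [ih (a + 1) bnd (by omega)]
        split_ifs with h1 h2 h2 <;> first | rfl | omega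
      | true =>
        have heq : a = q := (hp a).1 hpa
        simp only [if_true]
        rw [ih (a + 1) bnd (by omega), if_neg (by omega), if_pos (by refine ⟨by omega, by omega⟩)]
        simp [heq]
  exact fun a bnd => H (bnd - a).toNat a bnd rfl

lemma pv_inner_loop (area b : Int) (hb : 1 ≤ b) (hba : b ≤ area) (acc : List (Int × Int)) :
    (PySem.List.pyRange (b + 1) (area + 1) 1).foldl (fun c l =>
        let d := l * b
        if d == area then c ++ [(l, b)] else c) acc
      = acc ++ (if b ∣ area ∧ b * b < area then [(area / b, b)] else []) := by
  show (PySem.List.pyRange (b + 1) (area + 1) 1).foldl (fun c l =>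
      if (l * b == area) then c ++ [(l, b)] else c) acc = _
  rw [PySem.List.foldl_append_if]
  by_cases hd : b ∣ area
  · have hq1 : area / b * b = area := Int.ediv_mul_cancel hd
    have hp : ∀ l : Int, ((l * b == area) = true) ↔ l = area / b := by
      intro l
      rw [beq_iff_eq]
      constructor
      · intro h
        rw [← h, Int.mul_ediv_cancel _ (by omega)]
      · intro h
        rw [h, hq1]
    rw [pv_filter_eq_singleton (area / b) _ hp]
    have hqle : area / b ≤ area := Int.ediv_le_self _ (by omega)
    by_cases hbb : b * b < area
    · have hlt : b < area / b := by nlinarith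
      rw [if_pos (by omega), if_pos ⟨hd, hbb⟩]
      rfl
    · have hge : area / b ≤ b := by nlinarith
      rw [if_neg (by omega), if_neg (by tauto)]
      rfl
  · have hall : List.filter (fun l => l * b == area) (PySem.List.pyRange (b + 1) (area + 1) 1) = [] := by
      rw [List.filter_eq_nil_iff]
      intro x _ hx
      simp only [beq_iff_eq] at hx
      exact hd ⟨x, by rw [← hx, mul_comm]⟩
    rw [hall, if_neg (by tauto)]
    rfl

lemma pv_rectC_eq (area : Int) :
    rectC area = (pvDivs area).map (fun b => (area / b, b)) := by
  have H : ∀ n : Nat, ∀ m : Int, 1 ≤ m → (area + 1 - m).toNat = n → ∀ acc : List (Int × Int),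
      (PySem.List.pyRange m (area + 1) 1).foldl (fun c b =>
        (PySem.List.pyRange (b + 1) (area + 1) 1).foldl (fun c l =>
          let d := l * b
          if d == area then c ++ [(l, b)] else c) c) acc
      = acc ++ ((PySem.List.pyRange m (area + 1) 1).filter
          (fun b => decide (b ∣ area) && decide (b * b < area))).map (fun b => (area / b, b)) := by
    intro n
    induction n with
    | zero =>
      intro m hm hn acc
      rw [PySem.List.pyRange_one_eq_nil (by omega)]
      simp
    | succ n ih =>
      intro m hm hn acc
      rw [PySem.List.pyRange_one_cons (by omega)]
      rw [List.foldl_cons, List.filter_cons]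
      show List.foldl _ ((PySem.List.pyRange (m + 1) (area + 1) 1).foldl (fun c l =>
          let d := l * m
          if d == area then c ++ [(l, m)] else c) acc) _ = _
      rw [pv_inner_loop area m hm (by omega) acc]
      rw [ih (m + 1) (by omega) (by omega)]
      by_cases hc : m ∣ area ∧ m * m < area
      · rw [if_pos hc]
        have hb : (decide (m ∣ area) && decide (m * m < area)) = true := by
          simp [hc.1, hc.2]
        rw [hb]
        simp
      · rw [if_neg hc]
        have hb : (decide (m ∣ area) && decide (m * m < area)) = false := by
          rcases not_and_or.mp hc with h | h <;> simp [h]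
        rw [hb]
        simp
  have h1 := H (area + 1 - 1).toNat 1 (by omega) rfl []
  simpa [rectC, pvDivs] using h1

lemma pv_mem_divs {area b : Int} (h : b ∈ pvDivs area) :
    1 ≤ b ∧ b ≤ area ∧ b ∣ area ∧ b * b < area := by
  simp only [pvDivs, List.mem_filter, PySem.List.mem_pyRange_one, Bool.and_eq_true,
    decide_eq_true_eq] at h
  exact ⟨h.1.1, by omega, h.2.1, h.2.2⟩

lemma pv_divs_ne_nil {area : Int} (h : 2 ≤ area) : pvDivs area ≠ [] := by
  have : (1 : Int) ∈ pvDivs area := by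
    simp only [pvDivs, List.mem_filter, PySem.List.mem_pyRange_one, Bool.and_eq_true,
      decide_eq_true_eq]
    exact ⟨⟨le_refl 1, by omega⟩, one_dvd area, by omega⟩
  exact List.ne_nil_of_mem this

-- the minimum scan of a list with strictly decreasing diffs ends at the last index
lemma pv_scan_last (c : List (Int × Int)) (hne : c ≠ [])
    (hdec : ∀ k : Nat, k + 1 < c.length →
      (c.getD (k + 1) (0, 0)).1 - (c.getD (k + 1) (0, 0)).2
        < (c.getD k (0, 0)).1 - (c.getD k (0, 0)).2) :
    rectScan c (0, (c.head hne).1 - (c.head hne).2)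
      = (((c.length - 1 : Nat) : Int), (c.getLast hne).1 - (c.getLast hne).2) := by
  have hlen : 1 ≤ c.length := by
    cases c with
    | nil => exact absurd rfl hne
    | cons c0 rest => simp
  have key : ∀ n : Nat, 1 ≤ n → n ≤ c.length →
      (PySem.List.pyRange 0 (n : Int) 1).foldl (fun st i =>
        let lst := PySem.List.pyGetD c i (0, 0)
        if st.2 > lst.1 - lst.2 then (i, lst.1 - lst.2) else st)
        (0, (c.getD 0 (0, 0)).1 - (c.getD 0 (0, 0)).2)
      = (((n - 1 : Nat) : Int),
          (c.getD (n - 1) (0, 0)).1 - (c.getD (n - 1) (0, 0)).2) := by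
    intro n
    induction n with
    | zero => intro h1 _; exact absurd h1 (by norm_num)
    | succ n ih =>
      intro h1 h2
      by_cases hn : n = 0
      · subst hn
        rw [show (((0 + 1 : Nat)) : Int) = 0 + 1 by norm_num, PySem.List.pyRange_one_singleton]
        simp [PySem.List.pyGetD_zero]
      · have hn1 : 1 ≤ n := by omega
        have ihr := ih hn1 (by omega)
        rw [show (((n + 1 : Nat)) : Int) = (n : Int) + 1 by push_cast; ring,
          PySem.List.pyRange_one_succ_right (by positivity), List.foldl_append, ihr,
          List.foldl_cons, List.foldl_nil]
        have hget : PySem.List.pyGetD c ((n : Nat) : Int) (0, 0) = c.getD n (0, 0) :=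
          PySem.List.pyGetD_natCast c n (0, 0)
        have hlt := hdec (n - 1) (by omega)
        rw [show n - 1 + 1 = n from by omega] at hlt
        simp only [hget]
        rw [if_pos hlt]
        simp
  have hfin := key c.length hlen (le_refl _)
  have hh : c.head hne = c.getD 0 (0, 0) := by
    cases c with
    | nil => exact absurd rfl hne
    | cons c0 rest => rfl
  have hl : c.getD (c.length - 1) (0, 0) = c.getLast hne := by
    rw [List.getD_eq_getElem c (0, 0) (by omega), List.getLast_eq_getElem]
  rw [rectScan, hh]
  rw [hl] at hfin
  exact hfin

lemma pv_loop_eq (area : Int) :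
    ∀ (b best : Int), 1 ≤ b →
      rectAltLoop area b best
        = ((PySem.List.pyRange b (area + 1) 1).filter
            (fun x => decide (x ∣ area) && decide (x * x < area))).getLastD best := by
  have H : ∀ n : Nat, ∀ b best : Int, (area - b).toNat = n → 1 ≤ b →
      rectAltLoop area b best
        = ((PySem.List.pyRange b (area + 1) 1).filter
            (fun x => decide (x ∣ area) && decide (x * x < area))).getLastD best := by
    intro n
    induction n using Nat.strong_induction_on with
    | _ n ih =>
      intro b best hn hb
      by_cases hb2 : b * b < area
      · have hba : b < area := by nlinarith [sq_nonneg b, sq_nonneg (b - 1)]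
        rw [rectAltLoop, if_pos hb2, PySem.List.pyRange_one_cons (by omega), List.filter_cons]
        by_cases hd : b ∣ area
        · have hmod : (PySem.Int.mod area b == 0) = true := by
            simp [PySem.Int.mod_eq_zero_iff_dvd, hd]
          have hcond : (decide (b ∣ area) && decide (b * b < area)) = true := by
            simp [hd, hb2]
          rw [hmod, if_pos rfl, hcond]
          simp only [if_true, List.getLastD_cons]
          exact ih (area - (b + 1)).toNat (by omega) (b + 1) b rfl (by omega)
        · have hmod : (PySem.Int.mod area b == 0) = false := by
            simp [PySem.Int.mod_eq_zero_iff_dvd, hd]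
          have hcond : (decide (b ∣ area) && decide (b * b < area)) = false := by
            simp [hd]
          rw [hmod, hcond]
          simp only [Bool.false_eq_true, if_false]
          exact ih (area - (b + 1)).toNat (by omega) (b + 1) best rfl (by omega)
      · rw [rectAltLoop, if_neg hb2]
        have hfil : ((PySem.List.pyRange b (area + 1) 1).filter
            (fun x => decide (x ∣ area) && decide (x * x < area))) = [] := by
          rw [List.filter_eq_nil_iff]
          intro x hx hxc
          have hbx : b ≤ x := (PySem.List.mem_pyRange_one.mp hx).1
          simp only [Bool.and_eq_true, decide_eq_true_eq] at hxc
          nlinarith [hxc.2, mul_le_mul hbx hbx (by omega : (0:Int) ≤ b) (by omega : (0:Int) ≤ x)]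
        rw [hfil]
        rfl
  exact fun b best hb => H (area - b).toNat b best rfl hb

-- ===== VERDICT (by name: the statement is the Claim_ definition above) =====
lemma pv_getD_rectC (area : Int) (k : Nat) (hk : k < (pvDivs area).length) :
    (rectC area).getD k (0, 0) = (area / (pvDivs area)[k], (pvDivs area)[k]) := by
  rw [pv_rectC_eq area, List.getD_eq_getElem _ _ (by simpa using hk), List.getElem_map]

lemma pv_divs_pairwise (area : Int) : (pvDivs area).Pairwise (· < ·) := by
  unfold pvDivs
  exact List.Pairwise.filter _ (PySem.List.pairwise_lt_pyRange_one 1 (area + 1))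

lemma pv_dec_rectC (area : Int) (h2 : 2 ≤ area) : ∀ k : Nat, k + 1 < (rectC area).length →
    ((rectC area).getD (k + 1) (0, 0)).1 - ((rectC area).getD (k + 1) (0, 0)).2
      < ((rectC area).getD k (0, 0)).1 - ((rectC area).getD k (0, 0)).2 := by
  intro k hk
  have hlen : (rectC area).length = (pvDivs area).length := by
    rw [pv_rectC_eq area]; simp
  have hk1 : k + 1 < (pvDivs area).length := by omega
  rw [pv_getD_rectC area k (by omega), pv_getD_rectC area (k + 1) hk1]
  have hblt : (pvDivs area)[k] < (pvDivs area)[k + 1] :=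
    List.pairwise_iff_getElem.mp (pv_divs_pairwise area) k (k + 1) (by omega) hk1 (by omega)
  obtain ⟨hb1, hba, hbd, hbb⟩ := pv_mem_divs (List.getElem_mem (by omega : k < (pvDivs area).length))
  obtain ⟨hb1', hba', hbd', hbb'⟩ := pv_mem_divs (List.getElem_mem hk1)
  set b := (pvDivs area)[k] with hbdef
  set b' := (pvDivs area)[k + 1] with hbdef'
  have hq : area / b * b = area := Int.ediv_mul_cancel hbd
  have hq' : area / b' * b' = area := Int.ediv_mul_cancel hbd'
  have hq'pos : 1 ≤ area / b' := by nlinarith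
  have hlt : area / b' < area / b := by nlinarith
  simp only []
  omega

theorem rect_spec : Claim_equal_rect := by
  intro area _ hpre
  unfold Spec_rect
  have h2 : 2 ≤ area := hpre
  have hdne : pvDivs area ≠ [] := pv_divs_ne_nil h2
  have hceq := pv_rectC_eq area
  have hcne : rectC area ≠ [] := by
    rw [hceq]; simpa using hdne
  have hlen : (rectC area).length = (pvDivs area).length := by rw [hceq]; simp
  have hdlen : 1 ≤ (pvDivs area).length := by
    cases hdv : pvDivs area with
    | nil => exact absurd hdv hdne
    | cons d0 dr => simp
  -- the last divisor
  have hblm : (pvDivs area).getLast hdne ∈ pvDivs area := List.getLast_mem hdne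
  obtain ⟨hl1, hla, hld, hlb⟩ := pv_mem_divs hblm
  -- A's side: the scan ends at the last element of c
  have hscan := pv_scan_last (rectC area) hcne (pv_dec_rectC area h2)
  have hlast : (rectC area).getLast hcne
      = (area / (pvDivs area).getLast hdne, (pvDivs area).getLast hdne) := by
    rw [List.getLast_eq_getElem, List.getLast_eq_getElem]
    simp only [hceq, List.getElem_map, List.length_map]
  have hgetbest : PySem.List.pyGetD (rectC area) ((((rectC area).length - 1 : Nat)) : Int) (0, 0)
      = (rectC area).getLast hcne := by
    rw [PySem.List.pyGetD_natCast, List.getD_eq_getElem _ _ (by omega), List.getLast_eq_getElem]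
  -- B's side
  have halt : rectAltLoop area 1 1 = (pvDivs area).getLast hdne := by
    rw [pv_loop_eq area 1 1 (le_refl 1)]
    show (pvDivs area).getLastD 1 = _
    rw [List.getLastD_eq_getLast?, List.getLast?_eq_some_getLast hdne, Option.getD_some]
  have hfdiv : PySem.Int.floordiv area ((pvDivs area).getLast hdne)
      = area / (pvDivs area).getLast hdne :=
    PySem.Int.floordiv_eq_ediv_of_pos (by omega)
  -- now compute both sides
  obtain ⟨d0, dr, hdv⟩ := List.exists_cons_of_ne_nil hdne
  have hc' : rectC area = (area / d0, d0) :: dr.map (fun b => (area / b, b)) := by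
    rw [hceq, hdv]; rfl
  have hhead : (rectC area).head hcne = (area / d0, d0) := by
    rw [List.head_eq_getElem]
    simp [hceq, hdv]
  rw [rect, rect_alt]
  rw [hc']
  simp only []
  rw [← hc']
  rw [hhead] at hscan
  have : rectScan (rectC area) (0, area / d0 - d0)
      = ((((rectC area).length - 1 : Nat) : Int),
          ((rectC area).getLast hcne).1 - ((rectC area).getLast hcne).2) := by
    simpa using hscan
  rw [this]
  simp only []
  rw [hgetbest, hlast, halt, hfdiv]
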